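-- pv_equiv track=rewrite | github.com/ethanhoumic/CVSD_final_BCH | 01_RTL/bch_decoders.py | generate_test_patterns
-- ===== SOURCE A (Python) =====
-- def generate_test_patterns(r, least_reliable_positions, p):
--     """
--     Generate 2^p test patterns by flipping combinations of least reliable bits
--
--     Args:
--         r: Original received polynomial (hard decision)
--         least_reliable_positions: List of p least reliable bit positions
--         p: Number of least reliable bits
--
--     Returns:
--         List of 2^p test patterns
--     """
--     test_patterns = []
--
--     for i in range(2 ** p):
--         pattern = r.copy()
--         for j in range(p):
--             if (i >> j) & 1:  # Check if j-th bit should be flipped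
--                 pos = least_reliable_positions[j]
--                 pattern[pos] ^= 1
--         test_patterns.append(pattern)
--
--     return test_patterns
-- ===== SOURCE B (Python) =====
-- def generate_test_patterns(r, least_reliable_positions, p):
--     """Doubling construction: start from [r] and, for each of the first p
--     least-reliable positions, append a flipped copy of every pattern built
--     so far — same 2^p patterns in the same order as bit-enumeration."""
--     patterns = [list(r)]
--     for pos in least_reliable_positions[:p]:
--         flipped = []
--         for pat in patterns:
--             q = list(pat)
--             q[pos] ^= 1
--             flipped.append(q)
--         patterns = patterns + flipped
--     return patterns
-- ===== Notes on version B (the rewrite author's own statement) =====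
-- stated objective: alternative
-- what changed: Replaces A's enumeration of all 2^p bit masks with per-pattern bit tests by incremental doubling: start from [r] and for each successive least-reliable position append a flipped copy of every pattern built so far, producing the same patterns in the same order with one copy and one flip per pattern instead of a copy plus p bit tests.
import Mathlib
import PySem

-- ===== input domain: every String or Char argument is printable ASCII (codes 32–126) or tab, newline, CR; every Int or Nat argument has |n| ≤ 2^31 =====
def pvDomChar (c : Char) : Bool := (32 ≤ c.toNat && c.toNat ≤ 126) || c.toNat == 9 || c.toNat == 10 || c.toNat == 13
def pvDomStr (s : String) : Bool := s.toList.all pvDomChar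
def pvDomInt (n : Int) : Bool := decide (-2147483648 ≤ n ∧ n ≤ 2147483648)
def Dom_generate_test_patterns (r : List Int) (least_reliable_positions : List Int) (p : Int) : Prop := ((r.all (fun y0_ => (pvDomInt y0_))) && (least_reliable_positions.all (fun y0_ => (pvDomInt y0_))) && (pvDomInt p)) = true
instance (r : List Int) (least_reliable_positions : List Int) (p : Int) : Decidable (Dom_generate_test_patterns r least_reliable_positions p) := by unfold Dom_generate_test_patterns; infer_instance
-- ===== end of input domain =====

-- B replaces A's per-index bit enumeration of 2^p patterns by incremental doubling
-- (each new position appends a flipped copy of every pattern built so far); objective: alternative.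


-- ===== PORT A =====
-- for i in range(2**p): pattern = r.copy(); for j in range(p): if (i >> j) & 1: pos = lrp[j]; pattern[pos] ^= 1
-- (p < 0 and out-of-range indices raise in Python; excluded by Pre_, the total forms pyGetD/pySetD are exact inside Pre_)
def generate_test_patterns (r : List Int) (least_reliable_positions : List Int) (p : Int) : List (List Int) :=
  (List.range (2 ^ p.toNat)).foldl (fun test_patterns i =>
    let pattern := (List.range p.toNat).foldl (fun (pattern : List Int) (j : Nat) =>
      if (i >>> j) &&& 1 == 1 then
        let pos := PySem.List.pyGetD least_reliable_positions (j : Int) 0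
        PySem.List.pySetD pattern pos (PySem.Int.bxor (PySem.List.pyGetD pattern pos 0) 1)
      else pattern) r
    test_patterns ++ [pattern]) []

-- ===== PORT B =====
-- q = list(pat); q[pos] ^= 1  (exact inside Pre_, where pos is in range)
def pvFlip (pat : List Int) (pos : Int) : List Int :=
  PySem.List.pySetD pat pos (PySem.Int.bxor (PySem.List.pyGetD pat pos 0) 1)

def generate_test_patterns_alt (r : List Int) (least_reliable_positions : List Int) (p : Int) : List (List Int) :=
  (PySem.List.slice least_reliable_positions none (some p)).foldl
    (fun patterns pos => patterns ++ patterns.map (fun pat => pvFlip pat pos)) [r]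

-- ===== PRECONDITION & SPEC =====
-- exactly where A returns: p ≥ 0 (else range(2**p) raises TypeError), p ≤ len(lrp) and every
-- used position a valid (possibly negative) index of r (else IndexError)
def Pre_generate_test_patterns (r : List Int) (least_reliable_positions : List Int) (p : Int) : Prop :=
  0 ≤ p ∧ p ≤ (least_reliable_positions.length : Int) ∧
  ∀ x ∈ least_reliable_positions.take p.toNat, PySem.Raise.InRange r.length x
instance (r : List Int) (least_reliable_positions : List Int) (p : Int) : Decidable (Pre_generate_test_patterns r least_reliable_positions p) := by unfold Pre_generate_test_patterns; infer_instance

def pvWitness_generate_test_patterns : List Int × List Int × Int := ([1, 0, 1], [0, 2], 2)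

def Spec_generate_test_patterns (r : List Int) (least_reliable_positions : List Int) (p : Int) (out : List (List Int)) : Prop := out = generate_test_patterns_alt r least_reliable_positions p
instance (r : List Int) (least_reliable_positions : List Int) (p : Int) (out : List (List Int)) : Decidable (Spec_generate_test_patterns r least_reliable_positions p out) := by unfold Spec_generate_test_patterns; infer_instance

-- ===== CLAIM (what is proved, stated in full; the proofs are below) =====
def Claim_equal_generate_test_patterns : Prop := ∀ (r : List Int) (least_reliable_positions : List Int) (p : Int), Dom_generate_test_patterns r least_reliable_positions p → Pre_generate_test_patterns r least_reliable_positions p → Spec_generate_test_patterns r least_reliable_positions p (generate_test_patterns r least_reliable_positions p)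

-- ===== LEMMAS AND PROOFS =====

-- A's inner loop on pattern index i, written as a named function of i
def pvPatA (r lrp : List Int) (k : Nat) (i : Nat) : List Int :=
  (List.range k).foldl (fun (pattern : List Int) (j : Nat) =>
    if (i >>> j) &&& 1 == 1 then
      pvFlip pattern (PySem.List.pyGetD lrp (j : Int) 0)
    else pattern) r

lemma pvPatA_high_zero (r lrp : List Int) (k i : Nat) (hi : i < 2 ^ k) :
    pvPatA r lrp (k + 1) i = pvPatA r lrp k i := by
  unfold pvPatA
  rw [List.range_succ, List.foldl_append]
  have h0 : i >>> k = 0 := by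
    rw [Nat.shiftRight_eq_div_pow]; exact Nat.div_eq_of_lt hi
  simp [h0]

lemma pvBit_add_pow (k j i : Nat) (hj : j < k) :
    ((2 ^ k + i) >>> j) &&& 1 = (i >>> j) &&& 1 := by
  rw [Nat.shiftRight_eq_div_pow, Nat.shiftRight_eq_div_pow]
  have hpow : 2 ^ (k - j) * 2 ^ j = 2 ^ k := by
    rw [← Nat.pow_add]; congr 1; omega
  have hsplit : 2 ^ k + i = i + 2 ^ (k - j) * 2 ^ j := by omega
  rw [hsplit, Nat.add_mul_div_right _ _ (Nat.pow_pos (by omega)),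
      Nat.and_one_is_mod, Nat.and_one_is_mod]
  have h2 : 2 ^ (k - j) = 2 * 2 ^ (k - j - 1) := by
    rw [← Nat.pow_succ']; congr 1; omega
  omega

lemma pvPatA_high_one (r lrp : List Int) (k i : Nat) (hi : i < 2 ^ k) :
    pvPatA r lrp (k + 1) (2 ^ k + i)
      = pvFlip (pvPatA r lrp k i) (PySem.List.pyGetD lrp (k : Int) 0) := by
  unfold pvPatA
  rw [List.range_succ, List.foldl_append]
  have hlow : (List.range k).foldl (fun pattern j =>
      if ((2 ^ k + i) >>> j) &&& 1 == 1 then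
        pvFlip pattern (PySem.List.pyGetD lrp (j : Int) 0) else pattern) r
    = (List.range k).foldl (fun pattern j =>
      if (i >>> j) &&& 1 == 1 then
        pvFlip pattern (PySem.List.pyGetD lrp (j : Int) 0) else pattern) r := by
    apply PySem.List.foldl_congr_mem
    intro acc j hj
    rw [pvBit_add_pow k j i (List.mem_range.mp hj)]
  rw [hlow]
  have hhigh : (2 ^ k + i) >>> k = 1 := by
    have h1 : 2 ^ k + i = i + 1 * 2 ^ k := by ring
    rw [Nat.shiftRight_eq_div_pow, h1,
        Nat.add_mul_div_right _ _ (Nat.pow_pos (by omega)), Nat.div_eq_of_lt hi]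
  simp [hhigh]

-- main doubling lemma: A's bit-enumeration over range(2^k) equals B's k-fold doubling
lemma pv_main (r lrp : List Int) : ∀ k, k ≤ lrp.length →
    (List.range (2 ^ k)).map (pvPatA r lrp k)
      = (lrp.take k).foldl
          (fun patterns pos => patterns ++ patterns.map (fun pat => pvFlip pat pos)) [r] := by
  intro k
  induction k with
  | zero => intro _; simp [pvPatA]
  | succ k ih =>
    intro hk
    have hk' : k < lrp.length := by omega
    rw [List.take_add_one, List.foldl_append]
    have hget : lrp[k]?.toList = [lrp[k]] := by simp [List.getElem?_eq_getElem hk']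
    rw [hget]
    simp only [List.foldl_cons, List.foldl_nil]
    rw [← ih (by omega)]
    have hsplit : 2 ^ (k + 1) = 2 ^ k + 2 ^ k := by ring
    rw [hsplit, List.range_add, List.map_append, List.map_map]
    congr 1
    · apply List.map_congr_left
      intro i hi
      exact pvPatA_high_zero r lrp k i (List.mem_range.mp hi)
    · rw [List.map_map]
      apply List.map_congr_left
      intro i hi
      have := pvPatA_high_one r lrp k i (List.mem_range.mp hi)
      simpa [PySem.List.pyGetD_natCast, List.getD, List.getElem?_eq_getElem hk'] using this

-- ===== VERDICT (by name: the statement is the Claim_ definition above) =====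
theorem generate_test_patterns_spec : Claim_equal_generate_test_patterns := by
  intro r lrp p _ hpre
  obtain ⟨hp0, hplen, _⟩ := hpre
  unfold Spec_generate_test_patterns generate_test_patterns generate_test_patterns_alt
  rw [PySem.List.foldl_append_singleton_eq_map, PySem.List.slice_to _ hp0]
  exact pv_main r lrp p.toNat (by omega)
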